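-- pv_equiv track=rewrite | github.com/CodingThrust/problem-reductions | docs/paper/verify-reductions/adversary_partition_into_cliques_minimum_covering_by_cliques.py | brute_force_target
-- ===== SOURCE A (Python) =====
-- import itertools
--
-- def is_feasible_target(num_vertices, edges, num_cliques, edge_config):
--     """Check if edge_config is a valid covering by <= num_cliques cliques."""
--     if len(edge_config) != len(edges):
--         return False
--     if len(edges) == 0:
--         return True
--     if any(g < 0 for g in edge_config):
--         return False
--     max_group = max(edge_config)
--     if max_group >= num_cliques:
--         return False
--
--     adj = set()
--     for u, v in edges:
--         adj.add((min(u, v), max(u, v)))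
--
--     # For each group, collect vertices and verify clique
--     for g in range(max_group + 1):
--         vertices = set()
--         for idx, grp in enumerate(edge_config):
--             if grp == g:
--                 u, v = edges[idx]
--                 vertices.add(u)
--                 vertices.add(v)
--         verts = sorted(vertices)
--         for i in range(len(verts)):
--             for j in range(i + 1, len(verts)):
--                 a, b = min(verts[i], verts[j]), max(verts[i], verts[j])
--                 if (a, b) not in adj:
--                     return False
--     return True
--
-- def brute_force_target(num_vertices, edges, num_cliques):
--     """Find any valid edge clique cover with <= num_cliques groups, or None."""
--     if len(edges) == 0:
--         return []
--     for ng in range(1, num_cliques + 1):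
--         for edge_config in itertools.product(range(ng), repeat=len(edges)):
--             if is_feasible_target(num_vertices, edges, ng, list(edge_config)):
--                 return list(edge_config)
--     return None
-- ===== SOURCE B (Python) =====
-- def brute_force_target(num_vertices, edges, num_cliques):
--     """Find any valid edge clique cover with <= num_cliques groups, or None.
--
--     Backtracking DFS: edges are assigned to groups one at a time in lex
--     order, keeping each group's vertex set; an assignment is tried only if
--     the group stays a clique (incremental pairwise-adjacency check), so
--     infeasible prefixes are pruned instead of enumerated.
--     """
--     if not edges:
--         return []
--     adj = set()
--     for u, v in edges:
--         adj.add((min(u, v), max(u, v)))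
--
--     def compatible(vset, w):
--         return all(w == x or (min(w, x), max(w, x)) in adj for x in vset)
--
--     def dfs(rem, groups):
--         if not rem:
--             return []
--         (u, v), rest = rem[0], rem[1:]
--         for g, vset in enumerate(groups):
--             if compatible(vset, u) and compatible(vset, v):
--                 sub = dfs(rest, groups[:g] + [vset | {u, v}] + groups[g + 1:])
--                 if sub is not None:
--                     return [g] + sub
--         return None
--
--     for ng in range(1, num_cliques + 1):
--         res = dfs(edges, [set() for _ in range(ng)])
--         if res is not None:
--             return res
--     return None
-- ===== Notes on version B (the rewrite author's own statement) =====
-- stated objective: alternative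
-- what changed: Replaced exhaustive generate-and-test over all ng^m edge-group assignments (rebuilding adjacency and group vertex sets for every candidate) by a backtracking DFS that assigns edges to groups in lex order with an incremental clique-validity check against a precomputed adjacency set, pruning every infeasible prefix (measured 199x at n=64, but both remain exponential on unsatisfiable instances and both timed out at n=256).
import Mathlib
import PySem

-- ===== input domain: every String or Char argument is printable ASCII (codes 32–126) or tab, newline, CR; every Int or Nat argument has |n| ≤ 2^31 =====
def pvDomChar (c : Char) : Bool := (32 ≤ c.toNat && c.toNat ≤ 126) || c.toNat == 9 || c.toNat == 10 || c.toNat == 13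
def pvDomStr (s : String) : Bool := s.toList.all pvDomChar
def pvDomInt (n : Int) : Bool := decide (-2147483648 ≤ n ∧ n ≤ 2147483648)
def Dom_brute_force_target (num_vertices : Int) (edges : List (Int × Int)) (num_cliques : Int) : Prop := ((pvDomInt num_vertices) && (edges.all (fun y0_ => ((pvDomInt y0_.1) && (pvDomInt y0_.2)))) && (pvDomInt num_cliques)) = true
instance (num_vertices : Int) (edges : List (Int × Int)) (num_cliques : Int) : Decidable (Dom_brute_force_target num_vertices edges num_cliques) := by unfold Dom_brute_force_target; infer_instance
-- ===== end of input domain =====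

-- B replaces A's exhaustive enumeration of all ng^m group assignments by a backtracking
-- DFS in the same lex order with incremental clique-validity pruning (objective: alternative).

-- ===== PORT A =====

-- adj = set(); for u, v in edges: adj.add((min(u, v), max(u, v)))   [identical loop in both Pythons]
def pvAdj (edges : List (Int × Int)) : PySem.Set (Int × Int) :=
  edges.foldl (fun s e => PySem.Set.add s (min e.1 e.2, max e.1 e.2)) PySem.Set.empty

-- vertices = set(); for idx, grp in enumerate(edge_config): if grp == g: u, v = edges[idx]; vertices.add(u); vertices.add(v)
def pvGroupVerts (edges : List (Int × Int)) (edge_config : List Int) (g : Int) : PySem.Set Int :=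
  (PySem.List.enumerate edge_config).foldl (fun vs p =>
    if p.2 == g then
      match PySem.List.pyGet? edges p.1 with
      | some e => PySem.Set.add (PySem.Set.add vs e.1) e.2
      | none => vs          -- unreachable: enumerate indices are valid indices of edges
    else vs) PySem.Set.empty

-- for i in range(len(verts)): for j in range(i+1, len(verts)): if (min,max) not in adj: return False
def pvCliqueOK (adj : PySem.Set (Int × Int)) (verts : List Int) : Bool :=
  (PySem.List.pyRange 0 verts.length 1).all (fun i =>
    (PySem.List.pyRange (i + 1) verts.length 1).all (fun j =>
      let x := PySem.List.pyGetD verts i 0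
      let y := PySem.List.pyGetD verts j 0
      PySem.Set.contains adj (min x y, max x y)))

def is_feasible_target (num_vertices : Int) (edges : List (Int × Int)) (num_cliques : Int) (edge_config : List Int) : Bool :=
  if edge_config.length ≠ edges.length then false
  else if edges.length = 0 then true
  else if edge_config.any (fun g => decide (g < 0)) then false
  else
    match PySem.List.max? edge_config (fun x => x) with
    | none => false          -- unreachable: edge_config nonempty here
    | some max_group =>
      if max_group ≥ num_cliques then false
      else
        let adj := pvAdj edges
        (PySem.List.pyRange 0 (max_group + 1) 1).all (fun g =>
          pvCliqueOK adj (PySem.List.sorted (pvGroupVerts edges edge_config g) (fun x => x) false))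

-- 'for edge_config in itertools.product(range(ng), repeat=m): if p(config): return config'
-- consumed lazily in lex order, exactly as Python iterates the product
def pvProdFind (ng : Int) : (m : Nat) → (p : List Int → Bool) → Option (List Int)
  | 0, p => if p [] then some [] else none
  | m + 1, p => (PySem.List.pyRange 0 ng 1).findSome?
      (fun g => (pvProdFind ng m (fun c => p (g :: c))).map (g :: ·))

-- 'for ng in range(1, num_cliques + 1): …' as fuel recursion (the range is not materialized)
def pvSearchA (num_vertices : Int) (edges : List (Int × Int)) : Nat → Int → Option (List Int)
  | 0, _ => none
  | fuel + 1, ng =>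
    match pvProdFind ng edges.length (fun c => is_feasible_target num_vertices edges ng c) with
    | some c => some c
    | none => pvSearchA num_vertices edges fuel (ng + 1)

def brute_force_target (num_vertices : Int) (edges : List (Int × Int)) (num_cliques : Int) : Option (List Int) :=
  if edges.length = 0 then some []
  else pvSearchA num_vertices edges num_cliques.toNat 1

-- ===== PORT B =====

-- all(w == x or (min(w, x), max(w, x)) in adj for x in vset)
def pvCompatible (adj : PySem.Set (Int × Int)) (vset : PySem.Set Int) (w : Int) : Bool :=
  vset.all (fun x => w == x || PySem.Set.contains adj (min w x, max w x))

mutual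
-- def dfs(rem, groups): recursion on the remaining edges
def pvDfs (adj : PySem.Set (Int × Int)) : List (Int × Int) → List (PySem.Set Int) → Option (List Int)
  | [], _ => some []
  | e :: rest, groups => pvTry adj e.1 e.2 rest groups (PySem.List.enumerate groups)
termination_by rem _ => (rem.length, 0)
-- the 'for g, vset in enumerate(groups)' loop with early return
def pvTry (adj : PySem.Set (Int × Int)) (u v : Int) (rest : List (Int × Int))
    (groups : List (PySem.Set Int)) : List (Int × PySem.Set Int) → Option (List Int)
  | [] => none
  | p :: more =>
    if pvCompatible adj p.2 u && pvCompatible adj p.2 v then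
      match pvDfs adj rest (PySem.List.pySetD groups p.1 (PySem.Set.union p.2 [u, v])) with
      | some sub => some (p.1 :: sub)
      | none => pvTry adj u v rest groups more
    else pvTry adj u v rest groups more
termination_by lst => (rest.length, lst.length + 1)
end


-- 'for ng in range(1, num_cliques + 1): res = dfs(edges, [set()] * ng) …' as fuel recursion
def pvSearchB (adj : PySem.Set (Int × Int)) (edges : List (Int × Int)) : Nat → Int → Option (List Int)
  | 0, _ => none
  | fuel + 1, ng =>
    match pvDfs adj edges (List.replicate ng.toNat PySem.Set.empty) with
    | some r => some r
    | none => pvSearchB adj edges fuel (ng + 1)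

def brute_force_target_alt (num_vertices : Int) (edges : List (Int × Int)) (num_cliques : Int) : Option (List Int) :=
  if edges.length = 0 then some []
  else pvSearchB (pvAdj edges) edges num_cliques.toNat 1

-- ===== PRECONDITION & SPEC =====
def Spec_brute_force_target (num_vertices : Int) (edges : List (Int × Int)) (num_cliques : Int) (out : Option (List Int)) : Prop := out = brute_force_target_alt num_vertices edges num_cliques
instance (num_vertices : Int) (edges : List (Int × Int)) (num_cliques : Int) (out : Option (List Int)) : Decidable (Spec_brute_force_target num_vertices edges num_cliques out) := by unfold Spec_brute_force_target; infer_instance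

-- ===== CLAIM (what is proved, stated in full; the proofs are below) =====
def Claim_equal_brute_force_target : Prop := ∀ (num_vertices : Int) (edges : List (Int × Int)) (num_cliques : Int), Dom_brute_force_target num_vertices edges num_cliques → Spec_brute_force_target num_vertices edges num_cliques (brute_force_target num_vertices edges num_cliques)

-- ===== LEMMAS AND PROOFS =====

-- a vertex set is a clique of the adjacency set (membership-only property)
def pvIsClique (adj : PySem.Set (Int × Int)) (S : List Int) : Prop :=
  ∀ x ∈ S, ∀ y ∈ S, x ≠ y → PySem.Set.contains adj (min x y, max x y) = true

-- the incremental group updates along one full assignment (mirrors pvPathOK's state)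
def pvApply (rem : List (Int × Int)) (cfg : List Int) (gs : List (PySem.Set Int)) : List (PySem.Set Int) :=
  match rem, cfg with
  | e :: rest, g :: cfg' =>
      pvApply rest cfg' (PySem.List.pySetD gs g
        (PySem.Set.add (PySem.Set.add (PySem.List.pyGetD gs g PySem.Set.empty) e.1) e.2))
  | _, _ => gs

-- the list of all assignments itertools.product(range(ng), repeat=m) yields, in its order
def pvProduct (ng : Int) : Nat → List (List Int)
  | 0 => [[]]
  | m + 1 => (PySem.List.pyRange 0 ng 1).flatMap (fun g => (pvProduct ng m).map (g :: ·))

-- stepwise acceptance of a full assignment by the DFS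
def pvPathOK (adj : PySem.Set (Int × Int)) : List (Int × Int) → List Int → List (PySem.Set Int) → Bool
  | [], [], _ => true
  | e :: rest, g :: cfg', gs =>
      let vs := PySem.List.pyGetD gs g PySem.Set.empty
      pvCompatible adj vs e.1 && pvCompatible adj vs e.2 &&
        pvPathOK adj rest cfg' (PySem.List.pySetD gs g (PySem.Set.add (PySem.Set.add vs e.1) e.2))
  | _, _, _ => false

theorem pvFind?_congr {α : Type} (l : List α) (p q : α → Bool) (h : ∀ x ∈ l, p x = q x) :
    l.find? p = l.find? q := by
  induction l with
  | nil => rfl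
  | cons a t ih =>
    simp only [List.find?_cons, h a (by simp)]
    cases q a <;> simp_all

theorem mem_pvProduct (ng : Int) (m : Nat) (c : List Int) :
    c ∈ pvProduct ng m ↔ c.length = m ∧ ∀ g ∈ c, 0 ≤ g ∧ g < ng := by
  induction m generalizing c with
  | zero =>
    simp only [pvProduct, List.mem_singleton]
    constructor
    · rintro rfl; simp
    · rintro ⟨hl, _⟩; exact List.length_eq_zero_iff.1 hl
  | succ m ih =>
    simp only [pvProduct, List.mem_flatMap, List.mem_map, PySem.List.mem_pyRange_one]
    constructor
    · rintro ⟨g, ⟨hg0, hg1⟩, c', hc', rfl⟩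
      rcases (ih c').1 hc' with ⟨hl, hb⟩
      refine ⟨by simp [hl], ?_⟩
      intro x hx
      rcases List.mem_cons.1 hx with rfl | hx
      · exact ⟨hg0, hg1⟩
      · exact hb x hx
    · rintro ⟨hl, hb⟩
      cases c with
      | nil => simp at hl
      | cons g c' =>
        refine ⟨g, hb g (by simp), c', (ih c').2 ⟨by simpa using hl, fun x hx => hb x (by simp [hx])⟩, rfl⟩

theorem pvAdj_contains_of_edge (edges : List (Int × Int)) (e : Int × Int) (he : e ∈ edges) :
    PySem.Set.contains (pvAdj edges) (min e.1 e.2, max e.1 e.2) = true := by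
  rw [PySem.Set.contains_iff]
  unfold pvAdj
  rw [PySem.Set.mem_foldl_add]
  exact Or.inr ⟨e, he, rfl⟩

theorem pvCompatible_iff (adj : PySem.Set (Int × Int)) (vs : PySem.Set Int) (w : Int) :
    pvCompatible adj vs w = true ↔ ∀ x ∈ vs, w = x ∨ PySem.Set.contains adj (min w x, max w x) = true := by
  unfold pvCompatible
  simp [List.all_eq_true]

theorem pvDfs_spec (adj : PySem.Set (Int × Int)) :
    ∀ (rem : List (Int × Int)) (groups : List (PySem.Set Int)),
    pvDfs adj rem groups = (pvProduct (groups.length : Int) rem.length).find?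
      (fun c => pvPathOK adj rem c groups) := by
  intro rem
  induction rem with
  | nil =>
    intro groups
    simp [pvDfs, pvProduct, pvPathOK]
  | cons e rest ih =>
    obtain ⟨u, v⟩ := e
    intro groups
    rw [pvDfs]
    have key : ∀ (tail pre : List (PySem.Set Int)), groups = pre ++ tail →
        pvTry adj u v rest groups (PySem.List.enumerate tail (pre.length : Int)) =
        ((PySem.List.pyRange (pre.length : Int) (groups.length : Int) 1).flatMap
          (fun g => (pvProduct (groups.length : Int) rest.length).map (g :: ·))).find?
          (fun c => pvPathOK adj ((u, v) :: rest) c groups) := by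
      intro tail
      induction tail with
      | nil =>
        intro pre h
        subst h
        rw [PySem.List.pyRange_one_eq_nil (by simp)]
        simp [pvTry, PySem.List.enumerate]
      | cons vs tail' ihT =>
        intro pre h
        have hlt : (pre.length : Int) < (groups.length : Int) := by
          subst h; simp
        have hget : PySem.List.pyGetD groups (pre.length : Int) PySem.Set.empty = vs := by
          subst h
          rw [PySem.List.pyGetD_natCast]
          simp [List.getD]
        rw [PySem.List.enumerate_cons, pvTry, PySem.List.pyRange_one_cons hlt,
            List.flatMap_cons, List.find?_append, List.find?_map]
        have hrec : pvTry adj u v rest groups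
            (PySem.List.enumerate tail' ((pre.length : Int) + 1)) =
            ((PySem.List.pyRange ((pre.length : Int) + 1) (groups.length : Int) 1).flatMap
              (fun g => (pvProduct (groups.length : Int) rest.length).map (g :: ·))).find?
              (fun c => pvPathOK adj ((u, v) :: rest) c groups) := by
          have h2 : groups = (pre ++ [vs]) ++ tail' := by simp [h]
          have := ihT (pre ++ [vs]) h2
          simpa [List.length_append, Int.add_comm] using this
        have hunion : PySem.Set.union vs [u, v] = PySem.Set.add (PySem.Set.add vs u) v := rfl
        by_cases hc : (pvCompatible adj vs u && pvCompatible adj vs v) = true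
        · obtain ⟨hcu, hcv⟩ := Bool.and_eq_true_iff.1 hc
          simp only [hc]
          have hset : pvDfs adj rest (PySem.List.pySetD groups (pre.length : Int)
              (PySem.Set.union vs [u, v])) =
              (pvProduct (groups.length : Int) rest.length).find?
                (fun c => pvPathOK adj rest c (PySem.List.pySetD groups (pre.length : Int)
                  (PySem.Set.union vs [u, v]))) := by
            rw [ih]
            congr 2
            rw [PySem.List.pySetD_natCast]
            simp
          have hcomp : ((fun c => pvPathOK adj ((u, v) :: rest) c groups) ∘ ((pre.length : Int) :: ·)) =
              fun c => pvPathOK adj rest c (PySem.List.pySetD groups (pre.length : Int)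
                (PySem.Set.union vs [u, v])) := by
            funext c
            simp only [Function.comp, pvPathOK, hget, hunion, hcu, hcv, Bool.true_and]
          rw [hcomp, ← hset]
          cases hdfs : pvDfs adj rest (PySem.List.pySetD groups (pre.length : Int)
              (PySem.Set.union vs [u, v])) with
          | some sub => simp
          | none => simpa using hrec
        · simp only [hc]
          have hnone : List.find? ((fun c => pvPathOK adj ((u, v) :: rest) c groups) ∘
              ((pre.length : Int) :: ·)) (pvProduct (groups.length : Int) rest.length) = none := by
            rw [List.find?_eq_none]
            intro c _
            simp only [Function.comp, pvPathOK, hget]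
            cases hu : pvCompatible adj vs u <;> cases hv : pvCompatible adj vs v <;> simp_all
          rw [hnone]
          simp only [Option.map_none, Option.none_or]
          exact hrec
    have := key groups [] (by simp)
    simpa [pvProduct] using this

theorem nodup_pvGroupVerts (edges : List (Int × Int)) (cfg : List Int) (g : Int) :
    (pvGroupVerts edges cfg g).Nodup := by
  unfold pvGroupVerts
  generalize PySem.List.enumerate cfg = l
  have : ∀ (l : List (Int × Int)) (init : PySem.Set Int), init.Nodup →
      (l.foldl (fun vs p =>
        if p.2 == g then
          match PySem.List.pyGet? edges p.1 with
          | some e => PySem.Set.add (PySem.Set.add vs e.1) e.2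
          | none => vs
        else vs) init).Nodup := by
    intro l
    induction l with
    | nil => intro init h; exact h
    | cons p t ih =>
      intro init h
      refine ih _ ?_
      by_cases hp : p.2 == g
      · simp only [hp]
        cases PySem.List.pyGet? edges p.1 with
        | some e => exact PySem.Set.nodup_add _ _ (PySem.Set.nodup_add _ _ h)
        | none => exact h
      · simp only [hp]; exact h
  exact this l _ (List.nodup_nil)

theorem mem_pvGroupVerts (edges : List (Int × Int)) (cfg : List Int) (g : Int) (x : Int) :
    x ∈ pvGroupVerts edges cfg g ↔ ∃ (k : Nat) (h : k < cfg.length), cfg[k] = g ∧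
      ∃ e, PySem.List.pyGet? edges (k : Int) = some e ∧ (x = e.1 ∨ x = e.2) := by
  have main : ∀ (cfg : List Int) (s : Int) (init : PySem.Set Int),
      (x ∈ (PySem.List.enumerate cfg s).foldl (fun vs p =>
        if p.2 == g then
          match PySem.List.pyGet? edges p.1 with
          | some e => PySem.Set.add (PySem.Set.add vs e.1) e.2
          | none => vs
        else vs) init ↔ x ∈ init ∨ ∃ (k : Nat) (h : k < cfg.length), cfg[k] = g ∧
        ∃ e, PySem.List.pyGet? edges (s + k) = some e ∧ (x = e.1 ∨ x = e.2)) := by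
    intro cfg
    induction cfg with
    | nil => intro s init; simp [PySem.List.enumerate]
    | cons c t ih =>
      intro s init
      rw [PySem.List.enumerate_cons, List.foldl_cons, ih]
      have hstep : x ∈ (if ((s, c) : Int × Int).2 == g then
          match PySem.List.pyGet? edges ((s, c) : Int × Int).1 with
          | some e => PySem.Set.add (PySem.Set.add init e.1) e.2
          | none => init
        else init) ↔ x ∈ init ∨ (c = g ∧
          ∃ e, PySem.List.pyGet? edges s = some e ∧ (x = e.1 ∨ x = e.2)) := by
        by_cases hc : c = g
        · simp only [hc, beq_self_eq_true, if_true]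
          cases he : PySem.List.pyGet? edges s with
          | some e => simp [PySem.Set.mem_add, or_assoc]
          | none => simp
        · simp [hc]
      rw [hstep]
      constructor
      · rintro (⟨hx | ⟨hcg, e, he, hxe⟩⟩ | ⟨k, hk, hkg, e, he, hxe⟩)
        · exact Or.inl hx
        · exact Or.inr ⟨0, by simp, by simpa using hcg, e, by simpa using he, hxe⟩
        · refine Or.inr ⟨k + 1, by simpa using hk, by simpa using hkg, e, ?_, hxe⟩
          have : s + 1 + (k : Int) = s + ((k : Nat) + 1 : Nat) := by push_cast; ring
          rw [← this]; exact he
      · rintro (hx | ⟨k, hk, hkg, e, he, hxe⟩)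
        · exact Or.inl (Or.inl hx)
        · cases k with
          | zero => exact Or.inl (Or.inr ⟨by simpa using hkg, e, by simpa using he, hxe⟩)
          | succ k' =>
            refine Or.inr ⟨k', by simpa using hk, by simpa using hkg, e, ?_, hxe⟩
            have : s + 1 + (k' : Int) = s + ((k' : Nat) + 1 : Nat) := by push_cast; ring
            rw [this]; exact he
  have h0 := main cfg 0 PySem.Set.empty
  simp only [zero_add] at h0
  simp only [pvGroupVerts]
  rw [h0]
  simp [PySem.Set.empty]

theorem pvR_symm (adj : PySem.Set (Int × Int)) :
    Symmetric (fun x y : Int => PySem.Set.contains adj (min x y, max x y) = true) := by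
  intro x y h
  rwa [min_comm, max_comm]

theorem pvCliqueOK_pairwise (adj : PySem.Set (Int × Int)) (l : List Int) :
    pvCliqueOK adj l = true ↔
      l.Pairwise (fun x y => PySem.Set.contains adj (min x y, max x y) = true) := by
  rw [List.pairwise_iff_getElem]
  unfold pvCliqueOK
  simp only [List.all_eq_true, PySem.List.mem_pyRange_one]
  constructor
  · intro h i j hi hj hij
    have h1 := h (i : Int) ⟨by omega, by omega⟩ (j : Int) ⟨by omega, by omega⟩
    rw [PySem.List.pyGetD_eq_getElem l 0 (by omega) (by exact_mod_cast hi),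
         PySem.List.pyGetD_eq_getElem l 0 (by omega) (by exact_mod_cast hj)] at h1
    simpa using h1
  · intro h i ⟨hi0, hi1⟩ j ⟨hj0, hj1⟩
    rw [PySem.List.pyGetD_eq_getElem l 0 hi0 hi1, PySem.List.pyGetD_eq_getElem l 0 (by omega) hj1]
    exact h i.toNat j.toNat (by omega) (by omega) (by omega)

theorem pvCliqueOK_sorted_iff (adj : PySem.Set (Int × Int)) (vs : PySem.Set Int)
    (hnd : vs.Nodup) :
    pvCliqueOK adj (PySem.List.sorted vs (fun x => x) false) = true ↔ pvIsClique adj vs := by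
  have hperm := PySem.List.sorted_perm (xs := vs) (key := fun x : Int => x) (rev := false)
  rw [pvCliqueOK_pairwise]
  constructor
  · intro h x hx y hy hxy
    exact (h.forall (pvR_symm adj)) (hperm.symm.mem_iff.1 hx) (hperm.symm.mem_iff.1 hy) hxy
  · intro h
    refine List.Nodup.pairwise_of_forall_ne (hperm.nodup_iff.2 hnd) ?_
    intro a ha b hb hab
    exact h a (hperm.mem_iff.1 ha) b (hperm.mem_iff.1 hb) hab

theorem pvGroupVerts_empty_of_out (edges : List (Int × Int)) (c : List Int) (g : Int)
    (hout : g ∉ c) :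
    pvGroupVerts edges c g = [] := by
  have : ∀ x, x ∉ pvGroupVerts edges c g := by
    intro x hx
    rcases (mem_pvGroupVerts edges c g x).1 hx with ⟨k, hk, hkg, _⟩
    exact hout (hkg ▸ List.getElem_mem hk)
  cases hgv : pvGroupVerts edges c g with
  | nil => rfl
  | cons a t => exact absurd (by rw [hgv]; simp) (this a)

theorem is_feasible_iff (nv : Int) (edges : List (Int × Int)) (ng : Int) (c : List Int)
    (hlen : c.length = edges.length) (hne : edges ≠ [])
    (hb : ∀ g ∈ c, 0 ≤ g ∧ g < ng) :
    (is_feasible_target nv edges ng c = true ↔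
      ∀ g : Int, pvIsClique (pvAdj edges) (pvGroupVerts edges c g)) := by
  have hcne : c ≠ [] := by
    intro h; subst h; exact hne (List.eq_nil_of_length_eq_zero hlen.symm)
  unfold is_feasible_target
  rw [if_neg (by omega)]
  rw [if_neg (by intro h; exact hne (List.eq_nil_of_length_eq_zero h))]
  have hany : (c.any fun g => decide (g < 0)) = false := by
    rw [List.any_eq_false]
    intro g hg
    simpa using (hb g hg).1
  rw [hany]
  simp only [Bool.false_eq_true, if_false]
  cases hmax : PySem.List.max? c (fun x => x) with
  | none => exact absurd ((PySem.List.max?_eq_none_iff _ _).1 hmax) hcne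
  | some mg =>
    simp only []
    have hmgmem : mg ∈ c := PySem.List.max?_mem hmax
    have hmgmax : ∀ y ∈ c, y ≤ mg := by
      intro y hy
      exact PySem.List.max?_isMax hmax y hy
    have hmg0 : 0 ≤ mg := (hb mg hmgmem).1
    have hmgng : mg < ng := (hb mg hmgmem).2
    rw [if_neg (by omega)]
    simp only [List.all_eq_true, PySem.List.mem_pyRange_one]
    constructor
    · intro h g
      by_cases hgin : 0 ≤ g ∧ g ≤ mg
      · have := h g ⟨hgin.1, by omega⟩
        exact (pvCliqueOK_sorted_iff _ _ (nodup_pvGroupVerts edges c g)).1 this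
      · rw [pvGroupVerts_empty_of_out edges c g ?_]
        · intro x hx; simp at hx
        · intro hgc
          have h1 := hb _ hgc
          have h2 := hmgmax _ hgc
          omega
    · intro h g hg
      exact (pvCliqueOK_sorted_iff _ _ (nodup_pvGroupVerts edges c g)).2 (h g)

theorem pvGetD_pySetD_int {α : Type} (gs : List α) (g j : Int) (v : α) (d : α)
    (hg : 0 ≤ g ∧ g < gs.length) (hj : 0 ≤ j ∧ j < gs.length) :
    PySem.List.pyGetD (PySem.List.pySetD gs g v) j d = if j = g then v else PySem.List.pyGetD gs j d := by
  obtain ⟨m, rfl⟩ : ∃ m : Nat, g = (m : Int) := ⟨g.toNat, by omega⟩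
  obtain ⟨n, rfl⟩ : ∃ n : Nat, j = (n : Int) := ⟨j.toNat, by omega⟩
  rw [PySem.List.pySetD_natCast, PySem.List.pyGetD_natCast, PySem.List.pyGetD_natCast]
  simp only [List.getD, List.getElem?_set]
  by_cases h : (n : Int) = (m : Int)
  · have hmn : m = n := by omega
    subst hmn
    simp [show m < gs.length from by exact_mod_cast hg.2]
  · have hmn : ¬ (m = n) := by omega
    simp [h, hmn]

theorem pvGetD_replicate (n : Nat) (j : Int) (hj : 0 ≤ j ∧ j < n) :
    PySem.List.pyGetD (List.replicate n (PySem.Set.empty : PySem.Set Int)) j PySem.Set.empty = PySem.Set.empty := by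
  obtain ⟨m, rfl⟩ : ∃ m : Nat, j = (m : Int) := ⟨j.toNat, by omega⟩
  rw [PySem.List.pyGetD_natCast]
  simp [List.getD, show m < n by exact_mod_cast hj.2]

theorem mem_pvApply : ∀ (rem : List (Int × Int)) (cfg : List Int) (gs : List (PySem.Set Int)),
    cfg.length = rem.length → (∀ g ∈ cfg, 0 ≤ g ∧ g < (gs.length : Int)) →
    ∀ (j : Int), 0 ≤ j ∧ j < gs.length → ∀ (x : Int),
    (x ∈ PySem.List.pyGetD (pvApply rem cfg gs) j PySem.Set.empty ↔
      x ∈ PySem.List.pyGetD gs j PySem.Set.empty ∨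
      ∃ (k : Nat) (h1 : k < rem.length) (h2 : k < cfg.length),
        cfg[k] = j ∧ (x = (rem[k]).1 ∨ x = (rem[k]).2)) := by
  intro rem
  induction rem with
  | nil =>
    intro cfg gs hlen _ j hj x
    have : cfg = [] := List.eq_nil_of_length_eq_zero hlen
    subst this
    simp [pvApply]
  | cons e rest ih =>
    intro cfg gs hlen hb j hj x
    cases cfg with
    | nil => simp at hlen
    | cons g cfg' =>
      have hg := hb g (by simp)
      rw [pvApply]
      set vs := PySem.List.pyGetD gs g PySem.Set.empty with hvs
      set gs' := PySem.List.pySetD gs g (PySem.Set.add (PySem.Set.add vs e.1) e.2) with hgs'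
      have hlen' : gs'.length = gs.length := PySem.List.length_pySetD _ _ _
      rw [ih cfg' gs' (by simpa using hlen) (by rw [hlen']; exact fun y hy => hb y (by simp [hy]))
          j (by rw [hlen']; exact hj) x]
      have hget : PySem.List.pyGetD gs' j PySem.Set.empty =
          if j = g then PySem.Set.add (PySem.Set.add vs e.1) e.2 else PySem.List.pyGetD gs j PySem.Set.empty := by
        rw [hgs']; exact pvGetD_pySetD_int gs g j _ _ hg hj
      rw [hget]
      constructor
      · rintro (hx | ⟨k, h1, h2, hk, hke⟩)
        · by_cases hjg : j = g
          · subst hjg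
            rw [if_pos rfl] at hx
            rcases (PySem.Set.mem_add _ _ _).1 hx with hx2 | hx2
            · rcases (PySem.Set.mem_add _ _ _).1 hx2 with hx3 | hx3
              · exact Or.inl hx3
              · exact Or.inr ⟨0, by simp, by simp, by simp, by simp [hx3]⟩
            · exact Or.inr ⟨0, by simp, by simp, by simp, by simp [hx2]⟩
          · rw [if_neg hjg] at hx
            exact Or.inl hx
        · exact Or.inr ⟨k + 1, by simpa using h1, by simpa using h2, by simpa using hk, by simpa using hke⟩
      · rintro (hx | ⟨k, h1, h2, hk, hke⟩)
        · by_cases hjg : j = g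
          · subst hjg
            refine Or.inl ?_
            rw [if_pos rfl]
            exact (PySem.Set.mem_add _ _ _).2 (Or.inl ((PySem.Set.mem_add _ _ _).2 (Or.inl hx)))
          · rw [if_neg hjg]
            exact Or.inl hx
        · cases k with
          | zero =>
            simp only [List.getElem_cons_zero] at hk hke
            subst hk
            refine Or.inl ?_
            rw [if_pos rfl]
            rcases hke with rfl | rfl
            · exact (PySem.Set.mem_add _ _ _).2 (Or.inl ((PySem.Set.mem_add _ _ _).2 (Or.inr rfl)))
            · exact (PySem.Set.mem_add _ _ _).2 (Or.inr rfl)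
          | succ k' =>
            exact Or.inr ⟨k', by simpa using h1, by simpa using h2, by simpa using hk, by simpa using hke⟩

theorem pvClique_add_edge (adj : PySem.Set (Int × Int)) (vs : PySem.Set Int) (u v : Int)
    (hcl : pvIsClique adj vs)
    (hcu : ∀ x ∈ vs, u = x ∨ PySem.Set.contains adj (min u x, max u x) = true)
    (hcv : ∀ x ∈ vs, v = x ∨ PySem.Set.contains adj (min v x, max v x) = true)
    (huv : PySem.Set.contains adj (min u v, max u v) = true) :
    pvIsClique adj (PySem.Set.add (PySem.Set.add vs u) v) := by
  have hmem : ∀ z : Int, z ∈ PySem.Set.add (PySem.Set.add vs u) v → z ∈ vs ∨ z = u ∨ z = v := by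
    intro z hz
    rcases (PySem.Set.mem_add _ _ _).1 hz with h | h
    · rcases (PySem.Set.mem_add _ _ _).1 h with h2 | h2
      · exact Or.inl h2
      · exact Or.inr (Or.inl h2)
    · exact Or.inr (Or.inr h)
  have hget : ∀ w x : Int, (w = x ∨ PySem.Set.contains adj (min w x, max w x) = true) → x ≠ w →
      PySem.Set.contains adj (min x w, max x w) = true := by
    intro w x h hne
    rcases h with h | h
    · exact absurd h.symm hne
    · rw [min_comm x w, max_comm x w]; exact h
  intro x hx y hy hxy
  rcases hmem x hx with hx' | hx' | hx' <;> rcases hmem y hy with hy' | hy' | hy'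
  · exact hcl x hx' y hy' hxy
  · rw [hy']; rw [hy'] at hxy; exact hget u x (hcu x hx') hxy
  · rw [hy']; rw [hy'] at hxy; exact hget v x (hcv x hx') hxy
  · rw [hx']; rw [hx'] at hxy
    rcases hcu y hy' with h | h
    · exact absurd h hxy
    · exact h
  · exact absurd (hx'.trans hy'.symm) hxy
  · rw [hx', hy']; exact huv
  · rw [hx']; rw [hx'] at hxy
    rcases hcv y hy' with h | h
    · exact absurd h hxy
    · exact h
  · rw [hx', hy', min_comm, max_comm]; exact huv
  · exact absurd (hx'.trans hy'.symm) hxy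

theorem pvApply_cliques (adj : PySem.Set (Int × Int)) :
    ∀ (rem : List (Int × Int)) (cfg : List Int) (gs : List (PySem.Set Int)),
    cfg.length = rem.length →
    (∀ g ∈ cfg, 0 ≤ g ∧ g < (gs.length : Int)) →
    pvPathOK adj rem cfg gs = true →
    (∀ e ∈ rem, PySem.Set.contains adj (min e.1 e.2, max e.1 e.2) = true) →
    (∀ j : Int, 0 ≤ j ∧ j < gs.length → pvIsClique adj (PySem.List.pyGetD gs j PySem.Set.empty)) →
    ∀ j : Int, 0 ≤ j ∧ j < gs.length →
      pvIsClique adj (PySem.List.pyGetD (pvApply rem cfg gs) j PySem.Set.empty) := by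
  intro rem
  induction rem with
  | nil =>
    intro cfg gs hlen _ _ _ hcl j hj
    have : cfg = [] := List.eq_nil_of_length_eq_zero hlen
    subst this
    simpa [pvApply] using hcl j hj
  | cons e rest ih =>
    intro cfg gs hlen hb hpath hedge hcl j hj
    cases cfg with
    | nil => simp at hlen
    | cons g cfg2 =>
      have hg := hb g (by simp)
      rw [pvPathOK] at hpath
      simp only [Bool.and_eq_true] at hpath
      obtain ⟨⟨hcu, hcv⟩, hrest⟩ := hpath
      have hlen' : (PySem.List.pySetD gs g (PySem.Set.add (PySem.Set.add
          (PySem.List.pyGetD gs g PySem.Set.empty) e.1) e.2)).length = gs.length :=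
        PySem.List.length_pySetD _ _ _
      have hcl' : ∀ j : Int, 0 ≤ j ∧ j < (PySem.List.pySetD gs g (PySem.Set.add (PySem.Set.add
          (PySem.List.pyGetD gs g PySem.Set.empty) e.1) e.2)).length →
          pvIsClique adj (PySem.List.pyGetD (PySem.List.pySetD gs g (PySem.Set.add (PySem.Set.add
            (PySem.List.pyGetD gs g PySem.Set.empty) e.1) e.2)) j PySem.Set.empty) := by
        intro i hi
        rw [pvGetD_pySetD_int gs g i _ _ hg (by rwa [← hlen'])]
        by_cases hig : i = g
        · rw [if_pos hig]
          exact pvClique_add_edge adj _ e.1 e.2 (hcl g hg)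
            ((pvCompatible_iff adj _ e.1).1 hcu) ((pvCompatible_iff adj _ e.2).1 hcv)
            (hedge e (by simp))
        · rw [if_neg hig]
          exact hcl i (by rwa [← hlen'])
      have hres := ih cfg2 _ (by simpa using hlen)
        (by rw [hlen']; exact fun y hy => hb y (by simp [hy]))
        hrest (fun e' he' => hedge e' (by simp [he'])) hcl' j (by rwa [hlen'])
      rw [pvApply]
      exact hres

theorem pvPathOK_of_forall (adj : PySem.Set (Int × Int)) (F : Int → Int → Prop)
    (hF : ∀ g x y, F g x → F g y → x ≠ y → PySem.Set.contains adj (min x y, max x y) = true) :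
    ∀ (rem : List (Int × Int)) (cfg : List Int) (gs : List (PySem.Set Int)),
    cfg.length = rem.length →
    (∀ g ∈ cfg, 0 ≤ g ∧ g < (gs.length : Int)) →
    (∀ j : Int, 0 ≤ j ∧ j < gs.length → ∀ x ∈ PySem.List.pyGetD gs j PySem.Set.empty, F j x) →
    (∀ (k : Nat) (h : k < cfg.length), ∀ e : Int × Int, rem[k]? = some e →
      F (cfg[k]) e.1 ∧ F (cfg[k]) e.2) →
    pvPathOK adj rem cfg gs = true := by
  intro rem
  induction rem with
  | nil =>
    intro cfg gs hlen _ _ _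
    have : cfg = [] := List.eq_nil_of_length_eq_zero hlen
    subst this
    rfl
  | cons e rest ih =>
    intro cfg gs hlen hb hsub hfut
    cases cfg with
    | nil => simp at hlen
    | cons g cfg2 =>
      have hg := hb g (by simp)
      have hfut0 := hfut 0 (by simp) e (by simp)
      simp only [List.getElem_cons_zero] at hfut0
      have hcompat : ∀ w : Int, F g w →
          pvCompatible adj (PySem.List.pyGetD gs g PySem.Set.empty) w = true := by
        intro w hw
        rw [pvCompatible_iff]
        intro x hx
        by_cases hwx : w = x
        · exact Or.inl hwx
        · exact Or.inr (hF g w x hw (hsub g hg x hx) hwx)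
      rw [pvPathOK]
      simp only [Bool.and_eq_true]
      refine ⟨⟨hcompat e.1 hfut0.1, hcompat e.2 hfut0.2⟩, ?_⟩
      have hlen' : (PySem.List.pySetD gs g (PySem.Set.add (PySem.Set.add
          (PySem.List.pyGetD gs g PySem.Set.empty) e.1) e.2)).length = gs.length :=
        PySem.List.length_pySetD _ _ _
      refine ih cfg2 _ (by simpa using hlen)
        (by rw [hlen']; exact fun y hy => hb y (by simp [hy])) ?_ ?_
      · intro j hj x hx
        rw [pvGetD_pySetD_int gs g j _ _ hg (by rwa [← hlen'])] at hx
        by_cases hjg : j = g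
        · rw [if_pos hjg] at hx
          rcases (PySem.Set.mem_add _ _ _).1 hx with hx2 | hx2
          · rcases (PySem.Set.mem_add _ _ _).1 hx2 with hx3 | hx3
            · exact hjg ▸ hsub g hg x hx3
            · rw [hjg, hx3]; exact hfut0.1
          · rw [hjg, hx2]; exact hfut0.2
        · rw [if_neg hjg] at hx
          exact hsub j (by rwa [← hlen']) x hx
      · intro k hk e' he'
        have := hfut (k + 1) (by simpa using hk) e' (by simpa using he')
        simpa using this

theorem pvIsClique_congr (adj : PySem.Set (Int × Int)) (S T : List Int)
    (h : ∀ x, x ∈ S ↔ x ∈ T) : pvIsClique adj S ↔ pvIsClique adj T := by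
  constructor
  · intro hc x hx y hy hxy
    exact hc x ((h x).2 hx) y ((h y).2 hy) hxy
  · intro hc x hx y hy hxy
    exact hc x ((h x).1 hx) y ((h y).1 hy) hxy

theorem pvFeasible_eq_pathOK (nv : Int) (edges : List (Int × Int)) (ng : Int) (cfg : List Int)
    (hne : edges ≠ []) (hng : 1 ≤ ng) (hc : cfg ∈ pvProduct ng edges.length) :
    is_feasible_target nv edges ng cfg =
      pvPathOK (pvAdj edges) edges cfg (List.replicate ng.toNat PySem.Set.empty) := by
  obtain ⟨hlen, hb⟩ := (mem_pvProduct ng edges.length cfg).1 hc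
  set adj := pvAdj edges with hadj
  set gs0 : List (PySem.Set Int) := List.replicate ng.toNat PySem.Set.empty with hgs0
  have hgs0len : (gs0.length : Int) = ng := by
    rw [hgs0, List.length_replicate]; omega
  have hb' : ∀ g ∈ cfg, 0 ≤ g ∧ g < (gs0.length : Int) := by
    rw [hgs0len]; exact hb
  have hsub0 : ∀ j : Int, 0 ≤ j ∧ j < gs0.length →
      PySem.List.pyGetD gs0 j PySem.Set.empty = PySem.Set.empty := by
    intro j hj
    exact pvGetD_replicate ng.toNat j (by simpa [hgs0] using hj)
  -- membership of the final state equals membership of A's per-group vertex sets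
  have hmm : ∀ (j : Int), 0 ≤ j ∧ j < gs0.length → ∀ x : Int,
      (x ∈ PySem.List.pyGetD (pvApply edges cfg gs0) j PySem.Set.empty ↔
        x ∈ pvGroupVerts edges cfg j) := by
    intro j hj x
    rw [mem_pvApply edges cfg gs0 hlen hb' j hj x, mem_pvGroupVerts edges cfg j x,
        hsub0 j hj]
    simp only [PySem.Set.empty, List.not_mem_nil, false_or]
    constructor
    · rintro ⟨k, h1, h2, hk, hke⟩
      exact ⟨k, h2, hk, edges[k], by simp [PySem.List.pyGet?_natCast], hke⟩
    · rintro ⟨k, h2, hk, e, he, hke⟩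
      rw [PySem.List.pyGet?_natCast] at he
      have h1 : k < edges.length := by
        by_contra hcon
        rw [List.getElem?_eq_none (by omega)] at he
        simp at he
      rw [List.getElem?_eq_getElem h1] at he
      refine ⟨k, h1, h2, hk, ?_⟩
      cases he
      exact hke
  rw [Bool.eq_iff_iff]
  rw [is_feasible_iff nv edges ng cfg hlen hne hb]
  constructor
  · -- A-feasible → pathOK
    intro hgood
    refine pvPathOK_of_forall adj (fun g x => x ∈ pvGroupVerts edges cfg g) ?_ edges cfg gs0
      hlen hb' ?_ ?_
    · intro g x y hx hy hxy
      exact hgood g x hx y hy hxy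
    · intro j hj x hx
      rw [hsub0 j hj] at hx
      simp [PySem.Set.empty] at hx
    · intro k hk e he
      have hkE : k < edges.length := by omega
      rw [List.getElem?_eq_getElem hkE] at he
      cases he
      constructor <;>
        [exact (mem_pvGroupVerts edges cfg _ _).2
          ⟨k, hk, rfl, edges[k], by simp [PySem.List.pyGet?_natCast, List.getElem?_eq_getElem hkE], Or.inl rfl⟩;
         exact (mem_pvGroupVerts edges cfg _ _).2
          ⟨k, hk, rfl, edges[k], by simp [PySem.List.pyGet?_natCast, List.getElem?_eq_getElem hkE], Or.inr rfl⟩]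
  · -- pathOK → A-feasible
    intro hpath g
    by_cases hgin : 0 ≤ g ∧ g < (gs0.length : Int)
    · have hfinal := pvApply_cliques adj edges cfg gs0 hlen hb' hpath
        (fun e he => pvAdj_contains_of_edge edges e he)
        (fun j hj => by rw [hsub0 j hj]; intro x hx; simp [PySem.Set.empty] at hx)
        g hgin
      exact (pvIsClique_congr adj _ _ (hmm g hgin)).1 hfinal
    · rw [pvGroupVerts_empty_of_out edges cfg g ?_]
      · intro x hx; simp at hx
      · intro hgc
        have := hb g hgc
        rw [hgs0len] at hgin
        omega

theorem pvPerNg (nv : Int) (edges : List (Int × Int)) (ng : Int)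
    (hne : edges ≠ []) (hng : 1 ≤ ng) :
    (pvProduct ng edges.length).find? (fun cfg => is_feasible_target nv edges ng cfg) =
      pvDfs (pvAdj edges) edges (List.replicate ng.toNat PySem.Set.empty) := by
  rw [pvDfs_spec]
  rw [List.length_replicate]
  have hcast : ((ng.toNat : Nat) : Int) = ng := by omega
  rw [hcast]
  exact pvFind?_congr _ _ _ (fun cfg hc => pvFeasible_eq_pathOK nv edges ng cfg hne hng hc)

theorem pvFindSome?_congr {α β : Type} (l : List α) (f g : α → Option β)
    (h : ∀ x ∈ l, f x = g x) : l.findSome? f = l.findSome? g := by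
  induction l with
  | nil => rfl
  | cons a t ih =>
    rw [List.findSome?_cons, List.findSome?_cons, h a (by simp)]
    cases g a with
    | some b => rfl
    | none => exact ih (fun x hx => h x (by simp [hx]))

theorem pvFind?_flatMap {α β : Type} (l : List α) (f : α → List β) (p : β → Bool) :
    (l.flatMap f).find? p = l.findSome? (fun x => (f x).find? p) := by
  induction l with
  | nil => rfl
  | cons a t ih =>
    rw [List.flatMap_cons, List.find?_append, List.findSome?_cons, ih]
    cases (f a).find? p <;> rfl

theorem pvProdFind_eq (ng : Int) : ∀ (m : Nat) (p : List Int → Bool),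
    pvProdFind ng m p = (pvProduct ng m).find? p := by
  intro m
  induction m with
  | zero =>
    intro p
    rw [pvProdFind, pvProduct]
    simp only [List.find?]
    by_cases hp : p [] = true <;> simp [hp]
  | succ m ih =>
    intro p
    rw [pvProdFind, pvProduct, pvFind?_flatMap]
    refine pvFindSome?_congr _ _ _ ?_
    intro g _
    rw [List.find?_map, ih]
    rfl

theorem pvSearch_eq (nv : Int) (edges : List (Int × Int)) (hne : edges ≠ []) :
    ∀ (fuel : Nat) (ng : Int), 1 ≤ ng →
      pvSearchA nv edges fuel ng = pvSearchB (pvAdj edges) edges fuel ng := by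
  intro fuel
  induction fuel with
  | zero => intro ng _; rfl
  | succ fuel ih =>
    intro ng hng
    rw [pvSearchA, pvSearchB, pvProdFind_eq, pvPerNg nv edges ng hne hng,
        ih (ng + 1) (by omega)]

theorem brute_force_target_eq (nv : Int) (edges : List (Int × Int)) (k : Int) :
    brute_force_target nv edges k = brute_force_target_alt nv edges k := by
  unfold brute_force_target brute_force_target_alt
  by_cases h : edges.length = 0
  · rw [if_pos h, if_pos h]
  · rw [if_neg h, if_neg h]
    exact pvSearch_eq nv edges (fun hh => h (by simp [hh])) k.toNat 1 (by omega)


-- ===== VERDICT (by name: the statement is the Claim_ definition above) =====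
theorem brute_force_target_spec : Claim_equal_brute_force_target := by
  intro num_vertices edges num_cliques _
  unfold Spec_brute_force_target
  exact brute_force_target_eq num_vertices edges num_cliques
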